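-- pv_equiv track=rewrite | github.com/saltymilk-ini/blog | py/auto_deploy.py | redirect_inner_linkage
-- ===== SOURCE A (Python) =====
-- cnblog_link_marker = 'https://www.cnblogs.com/saltymilk/p/'
--
-- def redirect_inner_linkage(blog_text, inner_directory):
--     post = 0
--     prev = 0
--     redirected_text = ''
--
--     while True:
--         prev = blog_text.find(cnblog_link_marker, post)
--         if prev == -1:
--             break
--
--         redirected_text += blog_text[post:prev]
--         redirected_text += inner_directory
--
--         post = prev+len(cnblog_link_marker)
--         prev = blog_text.find('\"', post)
--         # illegal text content
--         if (prev == -1):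
--             return False
--
--         target_file = blog_text[post:prev]
--         if "#" not in target_file:
--             target_file += '.html'
--         else:
--             # if the link contains an jump mark, insert suffix before the mark
--             last_hash_pos = target_file.rfind('#')
--             target_name = target_file[0 : last_hash_pos]
--             target_file = target_name + '.html' + target_file[last_hash_pos:]
--
--         redirected_text+=target_file
--         post = prev
--
--     if post !=-1:
--         redirected_text += blog_text[post:]
--
--     return True
-- ===== SOURCE B (Python) =====
-- cnblog_link_marker = 'https://www.cnblogs.com/saltymilk/p/'
--
-- def redirect_inner_linkage(blog_text, inner_directory):
--     # The return value of A is a pure validity flag: its rewritten text is never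
--     # returned.  The scan can only fail on the rightmost marker occurrence, so a
--     # pair of rfind calls decides the result without any loop or rewriting.
--     p = blog_text.rfind(cnblog_link_marker)
--     if p == -1:
--         return True
--     return p + len(cnblog_link_marker) <= blog_text.rfind('"')
-- ===== Notes on version B (the rewrite author's own statement) =====
-- stated objective: simpler
-- what changed: Replaced A's rewriting scan loop (find/slice/suffix-insertion per marker occurrence) by two rfind calls: the returned flag only depends on whether the rightmost marker occurrence is followed by a double quote, so B computes p = rfind(marker) and returns p == -1 or p + len(marker) <= rfind('"'), dropping the dead text-rewriting entirely.
import Mathlib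
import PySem

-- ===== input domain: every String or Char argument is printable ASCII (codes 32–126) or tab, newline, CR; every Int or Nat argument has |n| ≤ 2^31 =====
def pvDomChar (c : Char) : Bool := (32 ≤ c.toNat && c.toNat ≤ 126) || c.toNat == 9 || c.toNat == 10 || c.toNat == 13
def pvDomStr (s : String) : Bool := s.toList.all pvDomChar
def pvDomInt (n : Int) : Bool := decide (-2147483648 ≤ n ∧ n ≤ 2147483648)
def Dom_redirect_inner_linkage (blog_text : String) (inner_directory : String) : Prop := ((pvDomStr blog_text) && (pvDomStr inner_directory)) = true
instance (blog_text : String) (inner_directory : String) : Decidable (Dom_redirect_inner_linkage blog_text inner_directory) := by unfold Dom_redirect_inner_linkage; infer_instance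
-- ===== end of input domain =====

-- B replaces A's rewriting scan loop by two rfind calls (the returned flag only
-- depends on the rightmost marker occurrence); the rewritten text A builds is dead.

-- ===== PORT A =====
def pvMarker : List Char := "https://www.cnblogs.com/saltymilk/p/".toList

-- termination facts for the loop: a successful find(sub, k) lies at or after k, and k ≤ len
theorem pvFindFrom_facts (s sub : List Char) (k : Nat)
    (h : PySem.Chars.findFrom s sub (k : Int) none ≠ -1) :
    (k : Int) ≤ PySem.Chars.findFrom s sub (k : Int) none ∧ k ≤ s.length := by
  have hknn : ¬((k : Int) < 0) := by omega
  have hr := PySem.Chars.neg_one_le_find (List.drop k (List.take s.length s)) sub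
  unfold PySem.Chars.findFrom at h ⊢
  simp only [hknn, if_false, Int.toNat_natCast, List.take_length] at h ⊢
  split_ifs at h ⊢ with h1 h2 <;> simp_all <;> omega

-- the while loop of A, carrying (post, redirected_text); result is the returned flag
def pvLoopA (s inner : List Char) (post : Nat) (acc : List Char) : Bool :=
  let prev := PySem.Chars.findFrom s pvMarker (post : Int) none
  if h : prev = -1 then
    -- "if post != -1" always holds (post is a nonneg index); final += is dead for the flag
    let _ := acc ++ PySem.Chars.slice s (some (post : Int)) none
    true
  else
    let p := prev.toNat
    let acc1 := acc ++ PySem.Chars.slice s (some (post : Int)) (some (p : Int)) ++ inner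
    let post2 := p + pvMarker.length
    let q := PySem.Chars.findFrom s ['"'] (post2 : Int) none
    if hq : q = -1 then false
    else
      let target0 := PySem.Chars.slice s (some (post2 : Int)) (some q)
      let target :=
        if PySem.Chars.isIn ['#'] target0 then
          let lastHash := PySem.Chars.rfind target0 ['#']
          PySem.Chars.slice target0 (some 0) (some lastHash) ++ ".html".toList
            ++ PySem.Chars.slice target0 (some lastHash) none
        else target0 ++ ".html".toList
      pvLoopA s inner q.toNat (acc1 ++ target)
termination_by s.length + 1 - post
decreasing_by
  have h1 := pvFindFrom_facts s pvMarker post h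
  have h2 := pvFindFrom_facts s ['"']
    ((PySem.Chars.findFrom s pvMarker (post : Int) none).toNat + pvMarker.length) hq
  have hml : pvMarker.length = 36 := by decide
  omega

def redirect_inner_linkage (blog_text : String) (inner_directory : String) : Bool :=
  pvLoopA blog_text.toList inner_directory.toList 0 []

-- ===== PORT B =====
def redirect_inner_linkage_alt (blog_text : String) (inner_directory : String) : Bool :=
  let p := PySem.Str.rfind blog_text "https://www.cnblogs.com/saltymilk/p/"
  if p = -1 then true
  else decide (p + ("https://www.cnblogs.com/saltymilk/p/" : String).length ≤ PySem.Str.rfind blog_text "\"")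

-- ===== PRECONDITION & SPEC =====
def Spec_redirect_inner_linkage (blog_text : String) (inner_directory : String) (out : Bool) : Prop := out = redirect_inner_linkage_alt blog_text inner_directory
instance (blog_text : String) (inner_directory : String) (out : Bool) : Decidable (Spec_redirect_inner_linkage blog_text inner_directory out) := by unfold Spec_redirect_inner_linkage; infer_instance

-- ===== CLAIM (what is proved, stated in full; the proofs are below) =====
def Claim_equal_redirect_inner_linkage : Prop := ∀ (blog_text : String) (inner_directory : String), Dom_redirect_inner_linkage blog_text inner_directory → Spec_redirect_inner_linkage blog_text inner_directory (redirect_inner_linkage blog_text inner_directory)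

-- ===== LEMMAS AND PROOFS =====

-- marker occurrence at index m / quote at index j (as prefix-of-drop facts)
def pvMarkAt (s : List Char) (m : Nat) : Prop := pvMarker <+: s.drop m
def pvQuoteAt (s : List Char) (j : Nat) : Prop := ['"'] <+: s.drop j

-- "every marker occurrence at or after k has a quote at or after its end"
def pvGood (s : List Char) (k : Nat) : Prop :=
  ∀ m, k ≤ m → pvMarkAt s m → ∃ j, m + 36 ≤ j ∧ pvQuoteAt s j

theorem pvMarkAt_le (s : List Char) (m : Nat) (h : pvMarkAt s m) : m + 36 ≤ s.length := by
  have := h.length_le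
  simp [List.length_drop] at this
  have hml : pvMarker.length = 36 := by decide
  omega

theorem pvQuoteAt_get (s : List Char) (j : Nat) (h : pvQuoteAt s j) : s[j]? = some '"' := by
  obtain ⟨t, ht⟩ := h
  have : (s.drop j)[0]? = some '"' := by rw [← ht]; rfl
  simpa [List.getElem?_drop] using this

-- a quote cannot sit inside a marker occurrence
theorem pvNoQuoteInside (s : List Char) (m j : Nat) (hm : pvMarkAt s m)
    (h1 : m ≤ j) (h2 : j < m + 36) (hq : pvQuoteAt s j) : False := by
  obtain ⟨t, ht⟩ := hm
  have hget : s[j]? = some '"' := pvQuoteAt_get s j hq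
  have hlen : pvMarker.length = 36 := by decide
  have hdrop : (s.drop m)[j - m]? = pvMarker[j - m]? := by
    rw [← ht, List.getElem?_append_left]
    omega
  rw [List.getElem?_drop] at hdrop
  have hjm : m + (j - m) = j := by omega
  rw [hjm, hget] at hdrop
  have : '"' ∈ pvMarker := List.mem_of_getElem? hdrop.symm
  exact absurd this (by decide)

theorem pvInfix_iff (sub t : List Char) : sub <:+: t ↔ ∃ j, sub <+: t.drop j := by
  rw [← PySem.Chars.isIn_iff_infix, ← PySem.Chars.exists_prefix_drop_iff_isIn]

-- find(sub, k) = -1 means no occurrence at or after k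
theorem pvFindFrom_none (s sub : List Char) (k : Nat) (hk : k ≤ s.length)
    (h : PySem.Chars.findFrom s sub (k : Int) none = -1) :
    ∀ m, k ≤ m → ¬ sub <+: s.drop m := by
  intro m hm hp
  have hni := (PySem.Chars.findFrom_natCast_eq_neg_one_iff s sub k hk).mp h
  apply hni
  rw [pvInfix_iff]
  exact ⟨m - k, by rwa [List.drop_drop, Nat.add_sub_cancel' hm]⟩

-- characterisation of rfind.go: either no occurrence ≤ k, or the largest one ≤ k
theorem pvRfindGo_cases (s sub : List Char) : ∀ k : Nat,
    (PySem.Chars.rfind.go s sub k = -1 ∧ ∀ j, j ≤ k → ¬ sub <+: s.drop j) ∨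
    (∃ m : Nat, PySem.Chars.rfind.go s sub k = (m : Int) ∧ m ≤ k ∧ sub <+: s.drop m ∧
      ∀ j, m < j → j ≤ k → ¬ sub <+: s.drop j) := by
  intro k
  induction k with
  | zero =>
    by_cases h : sub <+: s
    · right
      exact ⟨0, by simp [PySem.Chars.rfind.go, List.isPrefixOf_iff_prefix, h], by omega, by simpa using h,
        by omega⟩
    · left
      refine ⟨by simp [PySem.Chars.rfind.go, List.isPrefixOf_iff_prefix, h], ?_⟩
      intro j hj
      interval_cases j
      simpa using h
  | succ n ih =>
    by_cases h : sub <+: s.drop (n + 1)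
    · right
      exact ⟨n + 1, by simp [PySem.Chars.rfind.go, List.isPrefixOf_iff_prefix, h], by omega, h,
        by omega⟩
    · have hgo : PySem.Chars.rfind.go s sub (n + 1) = PySem.Chars.rfind.go s sub n := by
        simp [PySem.Chars.rfind.go, List.isPrefixOf_iff_prefix, h]
      rcases ih with ⟨he, hall⟩ | ⟨m, he, hmk, hpre, hmax⟩
      · left
        refine ⟨by rw [hgo, he], ?_⟩
        intro j hj
        rcases Nat.lt_or_ge j (n + 1) with hlt | hge
        · exact hall j (by omega)
        · have : j = n + 1 := by omega
          subst this; exact h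
      · right
        refine ⟨m, by rw [hgo, he], by omega, hpre, ?_⟩
        intro j hj1 hj2
        rcases Nat.lt_or_ge j (n + 1) with hlt | hge
        · exact hmax j hj1 (by omega)
        · have : j = n + 1 := by omega
          subst this; exact h

theorem pvRfind_none (s sub : List Char) (hsub : sub ≠ [])
    (h : PySem.Chars.rfind s sub = -1) : ∀ j, ¬ sub <+: s.drop j := by
  intro j hp
  rcases pvRfindGo_cases s sub s.length with ⟨_, hall⟩ | ⟨m, he, _, _, _⟩
  · rcases Nat.lt_or_ge s.length j with hlt | hle
    · rw [List.drop_eq_nil_of_le (by omega)] at hp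
      exact hsub (List.prefix_nil.mp hp)
    · exact hall j hle hp
  · rw [PySem.Chars.rfind] at h; rw [h] at he; omega

theorem pvRfind_some (s sub : List Char) (hsub : sub ≠ [])
    (h : PySem.Chars.rfind s sub ≠ -1) :
    ∃ m : Nat, PySem.Chars.rfind s sub = (m : Int) ∧ sub <+: s.drop m ∧
      ∀ j, sub <+: s.drop j → j ≤ m := by
  rcases pvRfindGo_cases s sub s.length with ⟨he, _⟩ | ⟨m, he, _, hpre, hmax⟩
  · exact absurd he h
  · rw [PySem.Chars.rfind]
    refine ⟨m, he, hpre, ?_⟩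
    intro j hp
    rcases Nat.lt_or_ge s.length j with hlt | hle
    · rw [List.drop_eq_nil_of_le (by omega)] at hp
      exact absurd (List.prefix_nil.mp hp) hsub
    · by_contra hc
      exact hmax j (by omega) hle hp

-- the loop computes exactly the pvGood flag (induction on the decreasing measure)
theorem pvLoopA_iff_aux (n : Nat) : ∀ (s inner : List Char) (post : Nat) (acc : List Char),
    s.length + 1 - post ≤ n → (pvLoopA s inner post acc = true ↔ pvGood s post) := by
  induction n with
  | zero =>
    intro s inner post acc hn
    have hpost : s.length < post := by omega
    have h : PySem.Chars.findFrom s pvMarker (post : Int) none = -1 := by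
      by_contra hc
      have := pvFindFrom_facts s pvMarker post hc
      omega
    rw [pvLoopA]
    dsimp only []
    rw [dif_pos h]
    simp only [true_iff]
    intro m hm hmk
    have hlen := pvMarkAt_le s m hmk
    omega
  | succ n ih =>
    intro s inner post acc hn
    rw [pvLoopA]
    dsimp only []
    by_cases h : PySem.Chars.findFrom s pvMarker (post : Int) none = -1
    · rw [dif_pos h]
      simp only [true_iff]
      intro m hm hmk
      have hlen := pvMarkAt_le s m hmk
      exact absurd hmk (pvFindFrom_none s pvMarker post (by omega) h m hm)
    · rw [dif_neg h]
      have hf := pvFindFrom_facts s pvMarker post h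
      have hsp := PySem.Chars.findFrom_natCast_spec s pvMarker post hf.2 h
      have hmk : pvMarkAt s (PySem.Chars.findFrom s pvMarker (post : Int) none).toNat := hsp.2.1
      have hlen := pvMarkAt_le s (PySem.Chars.findFrom s pvMarker (post : Int) none).toNat hmk
      have hml : pvMarker.length = 36 := by decide
      by_cases hq : PySem.Chars.findFrom s ['"']
          ((((PySem.Chars.findFrom s pvMarker (post : Int) none).toNat + pvMarker.length : Nat)) : Int) none = -1
      · rw [dif_pos hq]
        simp only [Bool.false_eq_true, false_iff]
        intro hG
        obtain ⟨j, hj1, hj2⟩ := hG (PySem.Chars.findFrom s pvMarker (post : Int) none).toNat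
          (by omega) hmk
        rw [hml] at hq
        exact pvFindFrom_none s ['"']
          ((PySem.Chars.findFrom s pvMarker (post : Int) none).toNat + 36) (by omega) hq j
          (by omega) hj2
      · rw [dif_neg hq]
        have hfq := pvFindFrom_facts s ['"']
          ((PySem.Chars.findFrom s pvMarker (post : Int) none).toNat + pvMarker.length) hq
        rw [ih s inner _ _ (by omega)]
        have hqsp := PySem.Chars.findFrom_natCast_spec s ['"']
          ((PySem.Chars.findFrom s pvMarker (post : Int) none).toNat + pvMarker.length) hfq.2 hq
        set qu := PySem.Chars.findFrom s ['"']
          ((((PySem.Chars.findFrom s pvMarker (post : Int) none).toNat + pvMarker.length : Nat)) : Int) none with hqu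
        have hquote : pvQuoteAt s qu.toNat := hqsp.2.1
        constructor
        · -- pvGood at qu.toNat → pvGood at post
          intro hG m hm hmkm
          rcases Nat.lt_or_ge m qu.toNat with hlt | hge
          · rcases Nat.lt_or_ge qu.toNat (m + 36) with hgt | hle
            · exact absurd hquote
                (fun hqa => pvNoQuoteInside s m qu.toNat hmkm (by omega) (by omega) hqa)
            · exact ⟨qu.toNat, hle, hquote⟩
          · exact hG m hge hmkm
        · -- pvGood at post → pvGood at qu.toNat (antitone)
          intro hG m hm hmkm
          exact hG m (by omega) hmkm

theorem pvLoopA_iff (s inner : List Char) (post : Nat) (acc : List Char) :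
    pvLoopA s inner post acc = true ↔ pvGood s post :=
  pvLoopA_iff_aux (s.length + 1 - post) s inner post acc le_rfl

-- pvGood at 0 is exactly B's two-rfind test
theorem pvGood_zero_iff (s : List Char) :
    pvGood s 0 ↔ (if PySem.Chars.rfind s pvMarker = -1 then true
      else decide (PySem.Chars.rfind s pvMarker + 36 ≤ PySem.Chars.rfind s ['"'])) = true := by
  have hmne : pvMarker ≠ [] := by decide
  have hqne : (['"'] : List Char) ≠ [] := by decide
  by_cases hp : PySem.Chars.rfind s pvMarker = -1
  · rw [if_pos hp]
    simp only [iff_true]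
    intro m _ hmk
    exact absurd hmk (pvRfind_none s pvMarker hmne hp m)
  · obtain ⟨ms, hms, hmspre, hmsmax⟩ := pvRfind_some s pvMarker hmne hp
    rw [if_neg hp, hms]
    constructor
    · intro hG
      obtain ⟨j, hj1, hj2⟩ := hG ms (by omega) hmspre
      have hqnn : PySem.Chars.rfind s ['"'] ≠ -1 := by
        intro hc
        exact pvRfind_none s ['"'] hqne hc j hj2
      obtain ⟨mq, hmq, _, hmqmax⟩ := pvRfind_some s ['"'] hqne hqnn
      have := hmqmax j hj2
      rw [hmq]
      simp only [decide_eq_true_eq]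
      omega
    · intro hd
      simp only [decide_eq_true_eq] at hd
      have hqnn : PySem.Chars.rfind s ['"'] ≠ -1 := by
        intro hc; rw [hc] at hd; omega
      obtain ⟨mq, hmq, hmqpre, _⟩ := pvRfind_some s ['"'] hqne hqnn
      rw [hmq] at hd
      intro m _ hmk
      have hmle := hmsmax m hmk
      exact ⟨mq, by omega, hmqpre⟩

-- B's port, rewritten over the character list of the input
theorem pvAlt_eq (bt i : String) :
    redirect_inner_linkage_alt bt i =
      (if PySem.Chars.rfind bt.toList pvMarker = -1 then true
       else decide (PySem.Chars.rfind bt.toList pvMarker + 36 ≤ PySem.Chars.rfind bt.toList ['"'])) := by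
  unfold redirect_inner_linkage_alt
  simp only [PySem.Str.rfind_eq,
    show ("https://www.cnblogs.com/saltymilk/p/" : String).toList = pvMarker from rfl,
    show ("\"" : String).toList = ['"'] from rfl,
    show ((("https://www.cnblogs.com/saltymilk/p/" : String).length : Int)) = 36 from rfl]

-- ===== VERDICT (by name: the statement is the Claim_ definition above) =====
theorem redirect_inner_linkage_spec : Claim_equal_redirect_inner_linkage := by
  intro blog_text inner_directory _
  unfold Spec_redirect_inner_linkage redirect_inner_linkage
  rw [pvAlt_eq blog_text inner_directory, Bool.eq_iff_iff, pvLoopA_iff]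
  exact pvGood_zero_iff blog_text.toList
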